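-- pv_equiv track=rewrite | github.com/chhayakadam/ADVANCE-ALGORITHM-ASSIGNMENTS | ASSIGNMENT 3 AA BELLMON FORD ALGORITHM(GREEDY ALGO).py | find_negative_cycle
-- ===== SOURCE A (Python) =====
-- def find_negative_cycle(parent, start):
--     # Start from any vertex that was relaxed in the last iteration
--     cycle = []
--     current = start
--     visited = set()
--
--     while current not in visited:
--         visited.add(current)
--         current = parent[current]
--
--     # To find the cycle, keep track of the cycle vertices
--     cycle_start = current
--     cycle.append(cycle_start)
--
--     current = parent[cycle_start]
--     while current != cycle_start:
--         cycle.append(current)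
--         current = parent[current]
--
--     cycle.append(cycle_start)
--     cycle.reverse()  # Reverse to get the correct order
--     return cycle
-- ===== SOURCE B (Python) =====
-- def find_negative_cycle(parent, start):
--     # One pass: record the walk and each vertex's position; the cycle is a
--     # slice of the recorded path instead of a second parent-pointer walk.
--     pos = {}
--     path = []
--     current = start
--     while current not in pos:
--         pos[current] = len(path)
--         path.append(current)
--         current = parent[current]
--     i = pos[current]
--     return [current] + path[i + 1:][::-1] + [current]
-- ===== Notes on version B (the rewrite author's own statement) =====
-- stated objective: alternative
-- what changed: B records the phase-1 walk as a list with a vertex-to-position dict and recovers the cycle as a reversed slice of that recorded path, eliminating A's visited-set plus the entire second parent-pointer walk.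
import Mathlib
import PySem

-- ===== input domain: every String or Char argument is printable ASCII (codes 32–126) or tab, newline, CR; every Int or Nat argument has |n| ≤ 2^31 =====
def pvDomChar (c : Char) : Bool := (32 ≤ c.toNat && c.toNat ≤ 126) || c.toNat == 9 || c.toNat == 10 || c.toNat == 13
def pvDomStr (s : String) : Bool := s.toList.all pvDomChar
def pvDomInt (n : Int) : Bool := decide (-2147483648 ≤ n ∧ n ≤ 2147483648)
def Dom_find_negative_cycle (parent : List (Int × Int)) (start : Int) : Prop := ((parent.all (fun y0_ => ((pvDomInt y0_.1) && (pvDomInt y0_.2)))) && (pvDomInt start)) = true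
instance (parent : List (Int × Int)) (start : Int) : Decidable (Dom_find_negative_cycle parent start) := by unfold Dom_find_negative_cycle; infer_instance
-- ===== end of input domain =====

-- B replaces A's visited-set walk plus second parent-pointer walk by a single recorded
-- walk (path list + position dict); the cycle is a reversed slice of the recorded path.

-- ===== PORT A =====
-- Python 'while' loops are ported with explicit fuel; parent.length + 2 steps always
-- suffice for a run that raises no KeyError (each iteration adds a fresh vertex).
-- 'none' marks exactly the KeyError runs, which Pre_ excludes.
def fncWalk (parent : List (Int × Int)) : Nat → PySem.Set Int → Int → Option Int
  | 0, _, _ => none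
  | fuel+1, visited, current =>
    if PySem.Set.contains visited current then some current
    else
      match PySem.Dict.get? (PySem.Dict.mk parent) current with
      | none => none                         -- Python: KeyError (outside Pre_)
      | some nxt => fncWalk parent fuel (PySem.Set.add visited current) nxt

def fncCollect (parent : List (Int × Int)) : Nat → Int → List Int → Int → Option (List Int)
  | 0, _, _, _ => none
  | fuel+1, cycleStart, cycle, current =>
    if current = cycleStart then some cycle
    else
      match PySem.Dict.get? (PySem.Dict.mk parent) current with
      | none => none                         -- Python: KeyError (outside Pre_)
      | some nxt => fncCollect parent fuel cycleStart (cycle ++ [current]) nxt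

def find_negative_cycle (parent : List (Int × Int)) (start : Int) : List Int :=
  match fncWalk parent (parent.length + 2) PySem.Set.empty start with
  | none => []
  | some cycleStart =>
    match PySem.Dict.get? (PySem.Dict.mk parent) cycleStart with
    | none => []                             -- Python: KeyError (outside Pre_)
    | some c0 =>
      match fncCollect parent (parent.length + 2) cycleStart [cycleStart] c0 with
      | none => []
      | some cycle => (cycle ++ [cycleStart]).reverse

-- ===== PORT B =====
def fncAltWalk (parent : List (Int × Int)) :
    Nat → PySem.Dict Int Int → List Int → Int → Option (PySem.Dict Int Int × List Int × Int)
  | 0, _, _, _ => none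
  | fuel+1, pos, path, current =>
    if PySem.Dict.contains pos current then some (pos, path, current)
    else
      match PySem.Dict.get? (PySem.Dict.mk parent) current with
      | none => none                         -- Python: KeyError (outside Pre_)
      | some nxt =>
          fncAltWalk parent fuel (PySem.Dict.insert pos current (path.length : Int))
            (path ++ [current]) nxt

def find_negative_cycle_alt (parent : List (Int × Int)) (start : Int) : List Int :=
  match fncAltWalk parent (parent.length + 2) PySem.Dict.empty [] start with
  | none => []
  | some (pos, path, current) =>
    match PySem.Dict.get? pos current with
    | none => []                             -- unreachable: current was just found in pos
    | some i => current :: (PySem.List.slice path (some (i + 1)) none).reverse ++ [current]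

-- ===== PRECONDITION & SPEC =====
-- the k-th parent-iterate of a vertex: the orbit of the (partial) parent map,
-- written with the library iterate on Option (none = a missing key was reached)
def fncIter (parent : List (Int × Int)) (k : Nat) (v : Int) : Option Int :=
  (fun o => o.bind (PySem.Dict.get? (PySem.Dict.mk parent)))^[k] (some v)

-- Pre_ excludes exactly the inputs on which Python A raises KeyError: A returns iff the
-- parent chain from start never reaches a missing key, i.e. every iterate of start up to
-- |parent|+2 exists (the walk repeats within |parent|+1 fresh vertices, after which it
-- cycles among already-visited keys forever).  B raises KeyError on the same inputs.
def Pre_find_negative_cycle (parent : List (Int × Int)) (start : Int) : Prop :=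
  ∀ k, k ≤ parent.length + 2 → (fncIter parent k start).isSome
instance (parent : List (Int × Int)) (start : Int) : Decidable (Pre_find_negative_cycle parent start) := by
  unfold Pre_find_negative_cycle; infer_instance

def pvWitness_find_negative_cycle : (List (Int × Int)) × Int := ([(0, 1), (1, 0)], 0)

def Spec_find_negative_cycle (parent : List (Int × Int)) (start : Int) (out : List Int) : Prop := out = find_negative_cycle_alt parent start
instance (parent : List (Int × Int)) (start : Int) (out : List Int) : Decidable (Spec_find_negative_cycle parent start out) := by unfold Spec_find_negative_cycle; infer_instance

-- ===== CLAIM (what is proved, stated in full; the proofs are below) =====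
def Claim_equal_find_negative_cycle : Prop := ∀ (parent : List (Int × Int)) (start : Int), Dom_find_negative_cycle parent start → Pre_find_negative_cycle parent start → Spec_find_negative_cycle parent start (find_negative_cycle parent start)

-- ===== LEMMAS AND PROOFS =====

-- B's pos dict as a function of the recorded path: vertex ↦ its index (offset n)
def fncIdx : List Int → Nat → List (Int × Int)
  | [], _ => []
  | x :: xs, n => (x, (n : Int)) :: fncIdx xs (n + 1)

lemma fncIdx_append (xs : List Int) (c : Int) : ∀ n,
    fncIdx (xs ++ [c]) n = fncIdx xs n ++ [(c, ((n + xs.length : Nat) : Int))] := by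
  induction xs with
  | nil => intro n; simp [fncIdx]
  | cons x xs ih => intro n; simp [fncIdx, ih (n + 1)]; omega

lemma fncIdx_get? (xs : List Int) (x : Int) : ∀ n,
    PySem.Dict.get? (PySem.Dict.mk (fncIdx xs n)) x
      = (PySem.List.index? xs x).map (fun k => ((n + k : Nat) : Int)) := by
  induction xs with
  | nil => intro n; simp [fncIdx, PySem.Dict.get?, PySem.List.index?]
  | cons y ys ih =>
      intro n
      by_cases hyx : y = x
      · subst hyx
        rw [PySem.List.index?_cons_self]
        simp [fncIdx, PySem.Dict.get?_mk_cons]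
      · rw [PySem.List.index?_cons_of_ne _ hyx]
        simp [fncIdx, PySem.Dict.get?_mk_cons, hyx, ih (n + 1)]
        cases hidx : List.idxOf? x ys with
        | none => simp
        | some k => simp; ring

lemma fncIdx_contains (xs : List Int) (x : Int) (n : Nat) :
    PySem.Dict.contains (PySem.Dict.mk (fncIdx xs n)) x = true ↔ x ∈ xs := by
  rw [PySem.Dict.contains_eq_isSome_get?, fncIdx_get?]
  rw [← PySem.List.index?_isSome_iff (xs := xs) (v := x)]
  cases PySem.List.index? xs x <;> simp

-- the parent-pointer chain along a list of vertices
def fncChain (parent : List (Int × Int)) (l : List Int) : Prop :=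
  ∀ j (h : j + 1 < l.length),
    PySem.Dict.get? (PySem.Dict.mk parent) (l[j]'(by omega)) = some (l[j+1]'h)

lemma fncChain_drop {parent : List (Int × Int)} {l : List Int} (h : fncChain parent l)
    (m : Nat) : fncChain parent (l.drop m) := by
  intro j hj
  simp only [List.length_drop] at hj
  have := h (m + j) (by omega)
  simpa [List.getElem_drop, Nat.add_assoc] using this

lemma fncChain_snoc {parent : List (Int × Int)} {w : List Int} {c y : Int}
    (h : fncChain parent (w ++ [c]))
    (hc : PySem.Dict.get? (PySem.Dict.mk parent) c = some y) :
    fncChain parent ((w ++ [c]) ++ [y]) := by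
  intro j hj
  simp only [List.length_append, List.length_cons, List.length_nil] at hj
  by_cases hlt : j + 1 < w.length + 1
  · have hlt' : j + 1 < (w ++ [c]).length := by simp; omega
    have := h j hlt'
    rw [List.getElem_append_left (by simp; omega), List.getElem_append_left hlt']
    exact this
  · have hj' : j = w.length := by omega
    subst hj'
    have e1 : ((w ++ [c]) ++ [y])[w.length]'(by simp) = c := by
      rw [List.getElem_append_left (by simp)]; simp
    have e2 : ((w ++ [c]) ++ [y])[w.length + 1]'(by simp) = y := by
      rw [List.getElem_append_right (by simp)]; simp
    rw [e1, e2, hc]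

lemma fncGet?_mem_values {parent : List (Int × Int)} {k v : Int}
    (h : PySem.Dict.get? (PySem.Dict.mk parent) k = some v) : v ∈ parent.map Prod.snd := by
  simp only [PySem.Dict.get?, Option.map_eq_some_iff] at h
  obtain ⟨p, hfind, hv⟩ := h
  exact hv ▸ List.mem_map_of_mem (List.mem_of_find?_eq_some hfind)

-- loop invariant of phase 1: the recorded path is duplicate-free and chains to current
def fncGood (parent : List (Int × Int)) (path : List Int) (current : Int) : Prop :=
  path.Nodup ∧ fncChain parent (path ++ [current])

-- a duplicate-free walk visits at most one vertex more than parent has entries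
lemma fncGood_length {parent : List (Int × Int)} {path : List Int} {current : Int}
    (h : fncGood parent path current) : path.length ≤ parent.length + 1 := by
  obtain ⟨hnd, hch⟩ := h
  cases path with
  | nil => simp
  | cons hd rest =>
      have hsub : rest ⊆ parent.map Prod.snd := by
        intro x hx
        obtain ⟨j, hj, rfl⟩ := List.mem_iff_getElem.mp hx
        have hj1 : j + 1 < ((hd :: rest) ++ [current]).length := by simp; omega
        have hc := hch j hj1
        have e : ((hd :: rest) ++ [current])[j+1]'hj1 = rest[j] := by
          rw [List.getElem_append_left (by simp; omega)]; simp
        rw [e] at hc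
        exact fncGet?_mem_values hc
      have hnd' : rest.Nodup := (List.nodup_cons.mp hnd).2
      have := (List.subperm_of_subset hnd' hsub).length_le
      simp at this ⊢
      omega

-- iterating one more step at the far end
lemma fncIter_snoc (parent : List (Int × Int)) (k : Nat) (v : Int) :
    fncIter parent (k + 1) v
      = (fncIter parent k v).bind (PySem.Dict.get? (PySem.Dict.mk parent)) := by
  unfold fncIter
  rw [Function.iterate_succ_apply']

-- if A's phase-1 walk runs out (none), either a lookup failed (an iterate is none)
-- or the fuel was exhausted with a duplicate-free path longer than possible
lemma fncWalk_none {parent : List (Int × Int)} {start : Int} :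
    ∀ (fuel : Nat) (path : List Int) (current : Int),
      fncGood parent path current →
      fncIter parent path.length start = some current →
      fncWalk parent fuel path current = none →
      (∃ j, j ≤ path.length + fuel ∧ fncIter parent j start = none)
        ∨ path.length + fuel ≤ parent.length + 1 := by
  intro fuel
  induction fuel with
  | zero =>
      intro path current hg _ _
      -- fuel exhausted: impossible to have started with enough fuel unless path long;
      -- here conclude via the length bound: path.length ≤ parent.length + 1 always,
      -- so report the left disjunct is not needed; we return the right one vacuously
      -- only when it holds — but with fuel 0 we cannot, so we use the bound:
      -- the caller instantiates fuel = parent.length + 2 with path = [], so the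
      -- recursion only reaches fuel 0 with path.length = parent.length + 2.
      exact Or.inr (by have := fncGood_length hg; omega)
  | succ f ih =>
      intro path current hg hit hw
      by_cases hmem : current ∈ path
      · simp [fncWalk, hmem] at hw
      · cases hget : PySem.Dict.get? (PySem.Dict.mk parent) current with
        | none =>
            left
            exact ⟨path.length + 1, by omega, by rw [fncIter_snoc, hit]; simp [hget]⟩
        | some nxt =>
            have hstep : fncWalk parent (f+1) path current
                = fncWalk parent f (path ++ [current]) nxt := by
              simp [fncWalk, hmem, hget]
            have hg' : fncGood parent (path ++ [current]) nxt := by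
              refine ⟨?_, fncChain_snoc hg.2 hget⟩
              simp [List.nodup_append, hg.1]
              exact fun a ha e => hmem (e ▸ ha)
            have hit' : fncIter parent (path ++ [current]).length start = some nxt := by
              simp only [List.length_append, List.length_cons, List.length_nil]
              rw [fncIter_snoc, hit]
              simp [hget]
            rw [hstep] at hw
            rcases ih (path ++ [current]) nxt hg' hit' hw with ⟨j, hj, hnone⟩ | hlen
            · exact Or.inl ⟨j, by simp at hj; omega, hnone⟩
            · exact Or.inr (by simp at hlen; omega)

-- phase-1 lockstep: A's set walk and B's recorded walk agree step for step
lemma fncMaster (parent : List (Int × Int)) : ∀ (fuel : Nat) (path : List Int) (current : Int),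
    fncGood parent path current →
    (fncWalk parent fuel path current = none ∧
     fncAltWalk parent fuel (PySem.Dict.mk (fncIdx path 0)) path current = none)
    ∨ ∃ path' cur',
        fncWalk parent fuel path current = some cur' ∧
        fncAltWalk parent fuel (PySem.Dict.mk (fncIdx path 0)) path current
          = some (PySem.Dict.mk (fncIdx path' 0), path', cur') ∧
        fncGood parent path' cur' ∧ cur' ∈ path' := by
  intro fuel
  induction fuel with
  | zero => intro path current _; exact Or.inl ⟨rfl, rfl⟩
  | succ f ih =>
      intro path current hgood
      by_cases hmem : current ∈ path
      · right
        refine ⟨path, current, ?_, ?_, hgood, hmem⟩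
        · simp [fncWalk, hmem]
        · simp [fncAltWalk, (fncIdx_contains path current 0).mpr hmem]
      · have hdc : PySem.Dict.contains (PySem.Dict.mk (fncIdx path 0)) current = false := by
          rw [← Bool.not_eq_true, fncIdx_contains]; exact hmem
        cases hget : PySem.Dict.get? (PySem.Dict.mk parent) current with
        | none => exact Or.inl ⟨by simp [fncWalk, hmem, hget], by simp [fncAltWalk, hdc, hget]⟩
        | some nxt =>
            have hstep1 : fncWalk parent (f+1) path current
                = fncWalk parent f (path ++ [current]) nxt := by
              simp [fncWalk, hmem, hget]
            have hins : PySem.Dict.insert (PySem.Dict.mk (fncIdx path 0)) current ((path.length : Nat) : Int)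
                = PySem.Dict.mk (fncIdx (path ++ [current]) 0) := by
              simp [PySem.Dict.insert, hdc, fncIdx_append]
            have hstep2 : fncAltWalk parent (f+1) (PySem.Dict.mk (fncIdx path 0)) path current
                = fncAltWalk parent f (PySem.Dict.mk (fncIdx (path ++ [current]) 0)) (path ++ [current]) nxt := by
              simp [fncAltWalk, hdc, hget, hins]
            have hgood' : fncGood parent (path ++ [current]) nxt := by
              refine ⟨?_, fncChain_snoc hgood.2 hget⟩
              simp [List.nodup_append, hgood.1]
              exact fun a ha e => hmem (e ▸ ha)
            rw [hstep1, hstep2]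
            rcases ih (path ++ [current]) nxt hgood' with ⟨h1, h2⟩ | ⟨p', c', h1, h2, h3, h4⟩
            · exact Or.inl ⟨h1, h2⟩
            · exact Or.inr ⟨p', c', h1, h2, h3, h4⟩

-- phase 2 of A walks exactly the recorded segment s (all ≠ cs) and stops at cs
lemma fncCollect_seg (parent : List (Int × Int)) (cs : Int) :
    ∀ (s : List Int) (fuel : Nat) (acc : List Int),
      (∀ x ∈ s, x ≠ cs) → fncChain parent (s ++ [cs]) → s.length + 1 ≤ fuel →
      fncCollect parent fuel cs acc ((s ++ [cs]).head (by simp)) = some (acc ++ s) := by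
  intro s
  induction s with
  | nil =>
      intro fuel acc _ _ hf
      match fuel, hf with
      | f + 1, _ => simp [fncCollect]
  | cons a t ih =>
      intro fuel acc hne hch hf
      cases fuel with
      | zero => exact absurd hf (by simp)
      | succ f =>
        have ha : a ≠ cs := hne a (by simp)
        have hget : PySem.Dict.get? (PySem.Dict.mk parent) a = some ((t ++ [cs]).head (by simp)) := by
          have h0 := hch 0 (by simp)
          simpa [List.head_eq_getElem] using h0
        have htail : fncChain parent (t ++ [cs]) := by
          have := fncChain_drop hch 1
          simpa using this
        have := ih f (acc ++ [a]) (fun x hx => hne x (by simp [hx])) htail (by simp at hf; omega)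
        simp only [List.head_cons, List.cons_append] at *
        simp [fncCollect, ha, hget, this]

-- ===== VERDICT (by name: the statement is the Claim_ definition above) =====
theorem find_negative_cycle_spec : Claim_equal_find_negative_cycle := by
  unfold Claim_equal_find_negative_cycle
  intro parent start _hdom hpre
  unfold Spec_find_negative_cycle find_negative_cycle find_negative_cycle_alt
  have hgood0 : fncGood parent [] start := ⟨List.nodup_nil, by intro j h; simp at h⟩
  rw [show (PySem.Set.empty : PySem.Set Int) = ([] : List Int) from rfl,
      show (PySem.Dict.empty : PySem.Dict Int Int) = PySem.Dict.mk (fncIdx [] 0) from rfl]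
  rcases fncMaster parent (parent.length + 2) [] start hgood0 with ⟨h1, h2⟩ | ⟨path', cur', h1, h2, hgood', hmem⟩
  · -- the walk cannot come out 'none' under Pre_
    exfalso
    have hit0 : fncIter parent ([] : List Int).length start = some start := rfl
    rcases fncWalk_none (parent.length + 2) [] start hgood0 hit0 h1 with ⟨j, hj, hnone⟩ | hlen
    · have := hpre j (by simpa using hj)
      rw [hnone] at this; simp at this
    · simp at hlen
  · rw [h1, h2]
    obtain ⟨k, hk⟩ : ∃ k, PySem.List.index? path' cur' = some k :=
      Option.isSome_iff_exists.mp ((PySem.List.index?_isSome_iff path' cur').mpr hmem)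
    obtain ⟨pre, suf, hdecomp, hklen, hnotpre⟩ := (PySem.List.index?_eq_some_iff path' cur' _).mp hk
    have hgetpos : PySem.Dict.get? (PySem.Dict.mk (fncIdx path' 0)) cur'
        = some ((k : Nat) : Int) := by
      rw [fncIdx_get?, hk]; simp
    have hslice : PySem.List.slice path' (some (((k : Nat) : Int) + 1)) none = suf := by
      rw [show (((k : Nat) : Int) + 1) = (((k + 1 : Nat)) : Int) by push_cast; ring]
      rw [PySem.List.slice_from (xs := path') (a := ((k + 1 : Nat) : Int)) (by omega)]
      rw [Int.toNat_natCast, ← hklen, hdecomp]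
      rw [show pre ++ cur' :: suf = (pre ++ [cur']) ++ suf by simp]
      rw [show pre.length + 1 = (pre ++ [cur']).length by simp]
      exact List.drop_left
    have hchain := hgood'.2
    rw [hdecomp] at hchain
    have hcsuf : fncChain parent (cur' :: (suf ++ [cur'])) := by
      have hd := fncChain_drop hchain pre.length
      have e : (pre ++ cur' :: suf ++ [cur']).drop pre.length = cur' :: (suf ++ [cur']) := by
        rw [show pre ++ cur' :: suf ++ [cur'] = pre ++ (cur' :: (suf ++ [cur'])) by simp]
        exact List.drop_left
      rwa [e] at hd
    have hgetcs : PySem.Dict.get? (PySem.Dict.mk parent) cur'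
        = some ((suf ++ [cur']).head (by simp)) := by
      have h0 := hcsuf 0 (by simp)
      simpa [List.head_eq_getElem] using h0
    have hnodup := hgood'.1
    rw [hdecomp] at hnodup
    have hsufne : ∀ x ∈ suf, x ≠ cur' := by
      have hns : cur' ∉ suf := by
        have h2' := List.Nodup.of_append_right hnodup
        exact (List.nodup_cons.mp h2').1
      exact fun x hx e => hns (e ▸ hx)
    have hsufchain : fncChain parent (suf ++ [cur']) := by
      simpa using fncChain_drop hcsuf 1
    have hlen : path'.length ≤ parent.length + 1 := fncGood_length hgood'
    have hsuflen : suf.length + 1 ≤ parent.length + 2 := by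
      have : path'.length = pre.length + 1 + suf.length := by rw [hdecomp]; simp; omega
      omega
    have hcol := fncCollect_seg parent cur' suf (parent.length + 2) [cur'] hsufne hsufchain hsuflen
    rw [h1, h2] at *
    simp [hgetpos, hgetcs, hcol, hslice]
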